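-- pv_equiv track=rewrite | github.com/hahyuning/Coding-test-study | problem_solving/2022/04/220402/220402_2.py | solution
-- ===== SOURCE A (Python) =====
-- def solution(n, edges, k, a, b):
--     graph = [[] for _ in range(n)]
--     for x, y in edges:
--         graph[x].append(y)
--         graph[y].append(x)
--
--     ans = set()
--     visited = [False] * n
--     a, b = min(a, b), max(a, b)
--
--     def dfs(now, path, dist):
--         if now == b:
--             if dist <= k:
--                 for x, y in path:
--                     ans.add((x, y))
--             return
--
--         for nxt in graph[now]:
--             if not visited[nxt]:
--                 visited[nxt] = True
--                 path.append((min(now, nxt), max(now, nxt)))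
--                 dfs(nxt, path, dist + 1)
--                 path.pop()
--                 visited[nxt] = False
--
--     visited[a] = True
--     dfs(a, [], 0)
--
--     return len(ans)
-- ===== SOURCE B (Python) =====
-- def solution(n, edges, k, a, b):
--     graph = [[] for _ in range(n)]
--     for x, y in edges:
--         graph[x] += [y]
--         graph[y] += [x]
--
--     a, b = min(a, b), max(a, b)
--
--     def paths(now, vis):
--         # all simple paths from `now` to b, each given as its list of normalized edges
--         if now == b:
--             return [[]]
--         res = []
--         for nxt in graph[now]:
--             if not vis[nxt]:
--                 vis2 = vis[:]
--                 vis2[nxt] = True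
--                 res += [[(min(now, nxt), max(now, nxt))] + p for p in paths(nxt, vis2)]
--         return res
--
--     vis0 = [False] * n
--     vis0[a] = True
--     ans = set()
--     for p in paths(a, vis0):
--         if len(p) <= k:
--             ans |= set(p)
--     return len(ans)
-- ===== Notes on version B (the rewrite author's own statement) =====
-- stated objective: alternative
-- what changed: A filters while traversing: a DFS that mutates a shared answer set, threads a path list and backtracks a visited array; B is a two-stage pure computation that first enumerates every simple a-b path as a value (list of normalized edges) and then, in a separate pass, unions the edges of the paths of length <= k.
import Mathlib
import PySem

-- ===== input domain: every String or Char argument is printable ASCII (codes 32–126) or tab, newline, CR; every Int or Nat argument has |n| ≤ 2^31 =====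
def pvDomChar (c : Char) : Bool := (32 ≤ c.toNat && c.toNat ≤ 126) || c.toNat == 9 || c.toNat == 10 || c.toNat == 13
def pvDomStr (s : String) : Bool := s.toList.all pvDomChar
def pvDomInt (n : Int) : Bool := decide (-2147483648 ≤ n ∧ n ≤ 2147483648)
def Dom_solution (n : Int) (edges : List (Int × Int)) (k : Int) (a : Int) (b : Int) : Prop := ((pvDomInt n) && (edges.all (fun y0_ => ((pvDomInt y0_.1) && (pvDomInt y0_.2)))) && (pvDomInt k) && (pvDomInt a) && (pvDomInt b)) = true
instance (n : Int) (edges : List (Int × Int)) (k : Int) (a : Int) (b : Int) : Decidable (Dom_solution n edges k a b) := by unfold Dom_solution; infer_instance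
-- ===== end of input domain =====

-- B replaces A's filtering-while-traversing DFS (shared mutable answer set, threaded path,
-- backtracked visited array) by a two-stage pure computation: first enumerate ALL simple
-- a-b paths as values, then filter by length <= k and union their edges; objective: alternative.

-- ===== PORT A =====
-- A's prologue: adjacency lists (Python negative indices wrap, via pySetD/pyGetD)
def pvGraph (n : Int) (edges : List (Int × Int)) : List (List Int) :=
  edges.foldl (fun g p =>
    let g1 := PySem.List.pySetD g p.1 (PySem.List.pyGetD g p.1 [] ++ [p.2])
    PySem.List.pySetD g1 p.2 (PySem.List.pyGetD g1 p.2 [] ++ [p.1]))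
    (List.replicate n.toNat [])

-- A's dfs: mutates the outer set `ans`, threads the current `path`; visited is restored
-- around every recursive call, so each frame passes its own updated copy down.
-- fuel (= n at the top call) only bounds the recursion for Lean: every recursive call
-- marks one more vertex visited, so depth < n and the fuel-0 branch is never live.
def dfsA (graph : List (List Int)) (b k : Int) :
    Nat → Int → List (Int × Int) → Int → List Bool → PySem.Set (Int × Int) → PySem.Set (Int × Int)
  | 0, now, path, dist, _, ans =>
      if now = b then (if dist ≤ k then PySem.Set.update ans path else ans) else ans
  | fuel+1, now, path, dist, visited, ans =>
      if now = b then (if dist ≤ k then PySem.Set.update ans path else ans)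
      else
        (PySem.List.pyGetD graph now []).foldl (fun ans nxt =>
          if PySem.List.pyGetD visited nxt true = false then
            dfsA graph b k fuel nxt (path ++ [(min now nxt, max now nxt)]) (dist + 1)
              (PySem.List.pySetD visited nxt true) ans
          else ans) ans

def solution (n : Int) (edges : List (Int × Int)) (k : Int) (a : Int) (b : Int) : Int :=
  let graph := pvGraph n edges
  let a' := min a b
  let b' := max a b
  let visited := PySem.List.pySetD (List.replicate n.toNat false) a' true
  PySem.Set.len (dfsA graph b' k n.toNat a' [] 0 visited PySem.Set.empty)

-- ===== PORT B =====
-- B's prologue builds the same adjacency lists (graph[x] += [y]; graph[y] += [x]), shared as pvGraph.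
-- Stage 1: enumerate every simple path from `now` to b as its list of normalized edges;
-- `vis` is copied (vis[:]) before being extended, so it is a pure value here too.
-- fuel (= n at the top call) only bounds the recursion for Lean (depth < n as in A).
def pathsB (graph : List (List Int)) (b : Int) :
    Nat → Int → List Bool → List (List (Int × Int))
  | 0, now, _ => if now = b then [[]] else []
  | fuel+1, now, vis =>
      if now = b then [[]]
      else
        (PySem.List.pyGetD graph now []).foldl (fun res nxt =>
          if PySem.List.pyGetD vis nxt true = false then
            res ++ (pathsB graph b fuel nxt (PySem.List.pySetD vis nxt true)).map
              (fun p => (min now nxt, max now nxt) :: p)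
          else res) []

-- Stage 2: keep the short-enough paths and union their edge sets.
def solution_alt (n : Int) (edges : List (Int × Int)) (k : Int) (a : Int) (b : Int) : Int :=
  let graph := pvGraph n edges
  let a' := min a b
  let b' := max a b
  let vis0 := PySem.List.pySetD (List.replicate n.toNat false) a' true
  PySem.Set.len ((pathsB graph b' n.toNat a' vis0).foldl
    (fun ans p => if (p.length : Int) ≤ k then PySem.Set.update ans p else ans)
    PySem.Set.empty)

-- ===== PRECONDITION & SPEC =====
-- Pre_ excludes exactly the inputs where the Python raises IndexError: an edge endpoint or
-- min(a,b) (the only vertex index A uses besides edge endpoints) outside [-n, n).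
def Pre_solution (n : Int) (edges : List (Int × Int)) (k : Int) (a : Int) (b : Int) : Prop :=
  PySem.Raise.InRange n.toNat (min a b) ∧
  ∀ p ∈ edges, PySem.Raise.InRange n.toNat p.1 ∧ PySem.Raise.InRange n.toNat p.2
instance (n : Int) (edges : List (Int × Int)) (k : Int) (a : Int) (b : Int) : Decidable (Pre_solution n edges k a b) := by unfold Pre_solution; infer_instance

def pvWitness_solution : Int × (List (Int × Int)) × Int × Int × Int :=
  (4, [(0, 1), (1, 2), (2, 3), (0, 3)], 3, 0, 3)

def Spec_solution (n : Int) (edges : List (Int × Int)) (k : Int) (a : Int) (b : Int) (out : Int) : Prop := out = solution_alt n edges k a b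
instance (n : Int) (edges : List (Int × Int)) (k : Int) (a : Int) (b : Int) (out : Int) : Decidable (Spec_solution n edges k a b out) := by unfold Spec_solution; infer_instance

-- ===== CLAIM (what is proved, stated in full; the proofs are below) =====
def Claim_equal_solution : Prop := ∀ (n : Int) (edges : List (Int × Int)) (k : Int) (a : Int) (b : Int), Dom_solution n edges k a b → Pre_solution n edges k a b → Spec_solution n edges k a b (solution n edges k a b)

-- ===== LEMMAS AND PROOFS =====

-- Stage-2 fold of B: membership characterization and nodup
theorem foldUpd_mem (k : Int) :
    ∀ (ps : List (List (Int × Int))) (acc : PySem.Set (Int × Int)) (e : Int × Int),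
      e ∈ ps.foldl (fun ans p => if (p.length : Int) ≤ k then PySem.Set.update ans p else ans) acc ↔
        e ∈ acc ∨ ∃ p ∈ ps, (p.length : Int) ≤ k ∧ e ∈ p := by
  intro ps
  induction ps with
  | nil => intro acc e; simp
  | cons p ps ih =>
      intro acc e
      rw [List.foldl_cons]
      by_cases hk : (p.length : Int) ≤ k
      · rw [if_pos hk, ih]
        simp [PySem.Set.mem_update, hk]
        tauto
      · rw [if_neg hk, ih]
        simp [hk]

theorem foldUpd_nodup (k : Int) :
    ∀ (ps : List (List (Int × Int))) (acc : PySem.Set (Int × Int)), acc.Nodup →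
      (ps.foldl (fun ans p => if (p.length : Int) ≤ k then PySem.Set.update ans p else ans) acc).Nodup := by
  intro ps
  induction ps with
  | nil => intro acc h; exact h
  | cons p ps ih =>
      intro acc h
      rw [List.foldl_cons]
      by_cases hk : (p.length : Int) ≤ k
      · rw [if_pos hk]; exact ih _ (PySem.Set.nodup_update _ _ h)
      · rw [if_neg hk]; exact ih _ h

-- A's DFS characterized by B's path enumeration, fold step
theorem foldA_mem (graph : List (List Int)) (b k : Int) (fuel : Nat)
    (ih : ∀ now path dist visited ans e,
      e ∈ dfsA graph b k fuel now path dist visited ans ↔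
        e ∈ ans ∨ ∃ p ∈ pathsB graph b fuel now visited,
          dist + (p.length : Int) ≤ k ∧ (e ∈ path ∨ e ∈ p)) :
    ∀ (l : List Int) (C : Int × Int → Prop) (now : Int) (path : List (Int × Int)) (dist : Int)
      (visited : List Bool) (ans : PySem.Set (Int × Int)) (res : List (List (Int × Int))),
      (∀ e, e ∈ ans ↔ C e ∨ ∃ p ∈ res, dist + (p.length : Int) ≤ k ∧ (e ∈ path ∨ e ∈ p)) →
      ∀ e, e ∈ l.foldl (fun ans nxt =>
              if PySem.List.pyGetD visited nxt true = false then
                dfsA graph b k fuel nxt (path ++ [(min now nxt, max now nxt)]) (dist + 1)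
                  (PySem.List.pySetD visited nxt true) ans
              else ans) ans ↔
            C e ∨ ∃ p ∈ l.foldl (fun res nxt =>
              if PySem.List.pyGetD visited nxt true = false then
                res ++ (pathsB graph b fuel nxt (PySem.List.pySetD visited nxt true)).map
                  (fun p => (min now nxt, max now nxt) :: p)
              else res) res, dist + (p.length : Int) ≤ k ∧ (e ∈ path ∨ e ∈ p) := by
  intro l
  induction l with
  | nil => intro C now path dist visited ans res H e; simpa using H e
  | cons nxt l ihl =>
      intro C now path dist visited ans res H e
      rw [List.foldl_cons, List.foldl_cons]
      by_cases hv : PySem.List.pyGetD visited nxt true = false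
      · simp only [hv, if_pos]
        refine ihl C now path dist visited _ _ ?_ e
        intro e'
        rw [ih nxt (path ++ [(min now nxt, max now nxt)]) (dist + 1)
          (PySem.List.pySetD visited nxt true) ans e', H e']
        constructor
        · rintro ((hc | ⟨p, hp, hlen, hmem⟩) | ⟨q, hq, hlen, hmem⟩)
          · exact Or.inl hc
          · exact Or.inr ⟨p, by simp [hp], hlen, hmem⟩
          · refine Or.inr ⟨(min now nxt, max now nxt) :: q, ?_, ?_, ?_⟩
            · simp only [List.mem_append, List.mem_map]
              exact Or.inr ⟨q, hq, rfl⟩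
            · simp only [List.length_cons]
              push_cast
              omega
            · rw [List.mem_append, List.mem_singleton] at hmem
              rcases hmem with (hp | he) | hr
              · exact Or.inl hp
              · exact Or.inr (by rw [List.mem_cons]; exact Or.inl he)
              · exact Or.inr (by rw [List.mem_cons]; exact Or.inr hr)
        · rintro (hc | ⟨p, hp, hlen, hmem⟩)
          · exact Or.inl (Or.inl hc)
          · rw [List.mem_append] at hp
            rcases hp with hp | hp
            · exact Or.inl (Or.inr ⟨p, hp, hlen, hmem⟩)
            · rw [List.mem_map] at hp
              obtain ⟨q, hq, rfl⟩ := hp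
              refine Or.inr ⟨q, hq, ?_, ?_⟩
              · simp only [List.length_cons] at hlen
                push_cast at hlen ⊢
                omega
              · rcases hmem with hp | hr
                · exact Or.inl (by rw [List.mem_append]; exact Or.inl hp)
                · rw [List.mem_cons] at hr
                  rcases hr with he | hr
                  · exact Or.inl (by rw [List.mem_append, List.mem_singleton]; exact Or.inr he)
                  · exact Or.inr hr
      · simp only [hv]
        exact ihl C now path dist visited ans res H e

theorem mem_dfsA (graph : List (List Int)) (b k : Int) :
    ∀ (fuel : Nat) (now : Int) (path : List (Int × Int)) (dist : Int) (visited : List Bool)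
      (ans : PySem.Set (Int × Int)) (e : Int × Int),
      e ∈ dfsA graph b k fuel now path dist visited ans ↔
        e ∈ ans ∨ ∃ p ∈ pathsB graph b fuel now visited,
          dist + (p.length : Int) ≤ k ∧ (e ∈ path ∨ e ∈ p) := by
  intro fuel
  induction fuel with
  | zero =>
      intro now path dist visited ans e
      unfold dfsA pathsB
      by_cases hb : now = b
      · by_cases hk : dist ≤ k <;>
          simp [hb, hk, PySem.Set.mem_update]
      · simp [hb]
  | succ fuel ih =>
      intro now path dist visited ans e
      unfold dfsA pathsB
      by_cases hb : now = b
      · by_cases hk : dist ≤ k <;>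
          simp [hb, hk, PySem.Set.mem_update]
      · simp only [hb]
        refine foldA_mem graph b k fuel ih _ (fun e' => e' ∈ ans) now path dist visited ans [] ?_ e
        intro e'
        simp

theorem foldA_nodup (graph : List (List Int)) (b k : Int) (fuel : Nat)
    (ih : ∀ now path dist visited ans, ans.Nodup →
      (dfsA graph b k fuel now path dist visited ans).Nodup) :
    ∀ (l : List Int) (now : Int) (path : List (Int × Int)) (dist : Int)
      (visited : List Bool) (ans : PySem.Set (Int × Int)), ans.Nodup →
      (l.foldl (fun ans nxt =>
          if PySem.List.pyGetD visited nxt true = false then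
            dfsA graph b k fuel nxt (path ++ [(min now nxt, max now nxt)]) (dist + 1)
              (PySem.List.pySetD visited nxt true) ans
          else ans) ans).Nodup := by
  intro l
  induction l with
  | nil => intro now path dist visited ans h; exact h
  | cons nxt l ihl =>
      intro now path dist visited ans h
      rw [List.foldl_cons]
      by_cases hv : PySem.List.pyGetD visited nxt true = false
      · simp only [hv, if_pos]
        exact ihl now path dist visited _ (ih _ _ _ _ _ h)
      · simp only [hv]
        exact ihl now path dist visited ans h

theorem nodup_dfsA (graph : List (List Int)) (b k : Int) :
    ∀ (fuel : Nat) (now : Int) (path : List (Int × Int)) (dist : Int) (visited : List Bool)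
      (ans : PySem.Set (Int × Int)), ans.Nodup →
      (dfsA graph b k fuel now path dist visited ans).Nodup := by
  intro fuel
  induction fuel with
  | zero =>
      intro now path dist visited ans h
      unfold dfsA
      by_cases hb : now = b
      · by_cases hk : dist ≤ k <;> simp [hb, hk, PySem.Set.nodup_update, h]
      · simp [hb, h]
  | succ fuel ih =>
      intro now path dist visited ans h
      unfold dfsA
      by_cases hb : now = b
      · by_cases hk : dist ≤ k <;> simp [hb, hk, PySem.Set.nodup_update, h]
      · simp only [hb]
        exact foldA_nodup graph b k fuel ih _ now path dist visited ans h

-- ===== VERDICT (by name: the statement is the Claim_ definition above) =====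
theorem solution_spec : Claim_equal_solution := by
  intro n edges k a b _ _
  unfold Spec_solution solution solution_alt
  dsimp only
  generalize pvGraph n edges = graph
  generalize PySem.List.pySetD (List.replicate n.toNat false) (min a b) true = visited
  have hperm : (dfsA graph (max a b) k n.toNat (min a b) [] 0 visited PySem.Set.empty).Perm
      ((pathsB graph (max a b) n.toNat (min a b) visited).foldl
        (fun ans p => if (p.length : Int) ≤ k then PySem.Set.update ans p else ans)
        PySem.Set.empty) := by
    rw [List.perm_ext_iff_of_nodup
      (nodup_dfsA graph (max a b) k n.toNat (min a b) [] 0 visited PySem.Set.empty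
        (by simp [PySem.Set.empty]))
      (foldUpd_nodup k _ PySem.Set.empty (by simp [PySem.Set.empty]))]
    intro e
    rw [mem_dfsA graph (max a b) k n.toNat (min a b) [] 0 visited PySem.Set.empty e,
      foldUpd_mem k _ PySem.Set.empty e]
    simp [PySem.Set.empty]
  simp only [PySem.Set.len]
  exact_mod_cast hperm.length_eq
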